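-- pv_equiv track=rewrite | github.com/erimcakir123/polymarket-agent | scripts/score_exit_sim.py | nba_score_exit
-- ===== SOURCE A (Python) =====
-- def nba_score_exit(hls, als, our_home):
--     for i in range(min(4, len(hls))):
--         ot = sum(hls[:i+1]) if our_home else sum(als[:i+1])
--         pt = sum(als[:i+1]) if our_home else sum(hls[:i+1])
--         deficit = pt - ot
--         q = i + 1
--         if q == 2 and deficit >= 15: return True, q, deficit
--         if q == 3 and deficit >= 20: return True, q, deficit
--         if q == 4 and deficit >= 10: return True, q, deficit
--     return False, None, 0
-- ===== SOURCE B (Python) =====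
-- def nba_score_exit(hls, als, our_home):
--     thresholds = {2: 15, 3: 20, 4: 10}
--     n = min(4, len(hls))
--     deficits = []
--     h = a = 0
--     for i in range(n):
--         h += hls[i]
--         if i < len(als):
--             a += als[i]
--         deficits.append(a - h if our_home else h - a)
--     for q, need in thresholds.items():
--         if q <= n and deficits[q - 1] >= need:
--             return True, q, deficits[q - 1]
--     return False, None, 0
-- ===== Notes on version B (the rewrite author's own statement) =====
-- stated objective: alternative
-- what changed: Replaces A's per-iteration prefix re-summing and inline if-chain by a single running-total pass that builds a deficit-per-quarter list, followed by a scan of an ordered threshold table {2:15,3:20,4:10}.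
import Mathlib
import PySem

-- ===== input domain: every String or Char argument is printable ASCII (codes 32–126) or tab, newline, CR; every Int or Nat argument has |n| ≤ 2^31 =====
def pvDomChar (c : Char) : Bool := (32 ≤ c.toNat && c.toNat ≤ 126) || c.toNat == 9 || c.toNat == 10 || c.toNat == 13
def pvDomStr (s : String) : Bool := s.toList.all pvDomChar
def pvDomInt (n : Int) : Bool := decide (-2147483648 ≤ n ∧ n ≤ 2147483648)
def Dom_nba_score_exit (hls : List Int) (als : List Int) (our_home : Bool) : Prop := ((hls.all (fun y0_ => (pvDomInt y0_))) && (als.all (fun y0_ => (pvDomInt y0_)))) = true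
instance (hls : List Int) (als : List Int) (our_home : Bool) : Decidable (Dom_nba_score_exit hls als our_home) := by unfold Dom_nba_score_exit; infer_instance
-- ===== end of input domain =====

-- B replaces A's per-iteration prefix re-summing and if-chain by one running-total pass building a
-- deficit-per-quarter list plus a threshold-table scan (objective: alternative decomposition).


-- ===== PORT A =====
-- A's loop 'for i in range(min(4, len(hls)))' with early return, step for step.
def nbaLoopA (hls als : List Int) (our_home : Bool) : List Nat → Bool × Option Int × Int
  | [] => (false, none, 0)
  | i :: rest =>
    let ot := if our_home then (PySem.List.slice hls none (some ((i + 1 : Nat) : Int))).sum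
              else (PySem.List.slice als none (some ((i + 1 : Nat) : Int))).sum
    let pt := if our_home then (PySem.List.slice als none (some ((i + 1 : Nat) : Int))).sum
              else (PySem.List.slice hls none (some ((i + 1 : Nat) : Int))).sum
    let deficit := pt - ot
    let q : Int := (i : Int) + 1
    if q = 2 ∧ deficit ≥ 15 then (true, some q, deficit)
    else if q = 3 ∧ deficit ≥ 20 then (true, some q, deficit)
    else if q = 4 ∧ deficit ≥ 10 then (true, some q, deficit)
    else nbaLoopA hls als our_home rest

def nba_score_exit (hls : List Int) (als : List Int) (our_home : Bool) : Bool × Option Int × Int :=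
  nbaLoopA hls als our_home (List.range (min 4 hls.length))

-- ===== PORT B =====
-- B phase 1: one pass with running totals h, a building the deficit-per-quarter list.
def nbaDeficitsB (hls als : List Int) (our_home : Bool) (n : Nat) : List Int :=
  ((List.range n).foldl
    (fun (st : Int × Int × List Int) i =>
      let h := st.1 + hls.getD i 0
      let a := if i < als.length then st.2.1 + als.getD i 0 else st.2.1
      (h, a, st.2.2 ++ [if our_home then a - h else h - a]))
    (0, 0, [])).2.2

-- B phase 2: scan the ordered threshold table, returning the first satisfied (q, need).
def nbaScanB (deficits : List Int) (n : Nat) : List (Int × Int) → Bool × Option Int × Int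
  | [] => (false, none, 0)
  | (q, need) :: rest =>
    if q ≤ (n : Int) ∧ PySem.List.pyGetD deficits (q - 1) 0 ≥ need then
      (true, some q, PySem.List.pyGetD deficits (q - 1) 0)
    else nbaScanB deficits n rest

def nba_score_exit_alt (hls : List Int) (als : List Int) (our_home : Bool) : Bool × Option Int × Int :=
  let n := min 4 hls.length
  nbaScanB (nbaDeficitsB hls als our_home n) n [(2, 15), (3, 20), (4, 10)]

-- ===== PRECONDITION & SPEC =====
def Spec_nba_score_exit (hls : List Int) (als : List Int) (our_home : Bool) (out : Bool × Option Int × Int) : Prop := out = nba_score_exit_alt hls als our_home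
instance (hls : List Int) (als : List Int) (our_home : Bool) (out : Bool × Option Int × Int) : Decidable (Spec_nba_score_exit hls als our_home out) := by unfold Spec_nba_score_exit; infer_instance

-- ===== CLAIM (what is proved, stated in full; the proofs are below) =====
def Claim_equal_nba_score_exit : Prop := ∀ (hls : List Int) (als : List Int) (our_home : Bool), Dom_nba_score_exit hls als our_home → Spec_nba_score_exit hls als our_home (nba_score_exit hls als our_home)

-- ===== LEMMAS AND PROOFS =====

-- ===== VERDICT (by name: the statement is the Claim_ definition above) =====
set_option maxHeartbeats 2000000 in
theorem nba_score_exit_spec : Claim_equal_nba_score_exit := by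
  intro hls als our_home _
  unfold Spec_nba_score_exit nba_score_exit nba_score_exit_alt
  rcases hls with _|⟨h1,_|⟨h2,_|⟨h3,_|⟨h4,ht⟩⟩⟩⟩ <;>
    rcases als with _|⟨a1,_|⟨a2,_|⟨a3,_|⟨a4,at_⟩⟩⟩⟩ <;>
    cases our_home <;>
    simp [nbaLoopA, nbaDeficitsB, nbaScanB, List.range_succ,
      PySem.List.slice, PySem.List.pyGetD, PySem.List.clampIdx, add_assoc]
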